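-- pv_equiv track=rewrite | github.com/Arsen1302/Code-copy-detector | TestData/solutions/problem_985_1.py | solution_985_1
-- ===== SOURCE A (Python) =====
-- from typing import List
--
-- def solution_985_1(h: int, w: int, hc: List[int], vc: List[int]) -> int:
--
--     hc.sort()
--     vc.sort()
--
--     maxh = hc[0]
--     maxv = vc[0]
--
--     for i in range(1, len(hc)):
--         maxh = max(maxh, hc[i] - hc[i-1])
--     maxh = max(maxh, h - hc[-1])
--
--     for i in range(1, len(vc)):
--         maxv = max(maxv, vc[i] - vc[i-1])
--     maxv = max(maxv, w - vc[-1])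
--
--     return maxh*maxv % (10**9 + 7)
-- ===== SOURCE B (Python) =====
-- # Bucket (pigeonhole) maximum-gap computation per axis instead of sorting.
-- # Does not mutate hc/vc (A sorts them in place).
--
-- def _max_adjacent_gap(cuts, lo, hi):
--     """Largest gap between consecutive values of cuts in sorted order."""
--     if lo == hi:
--         return 0
--     n = len(cuts)
--     width = -((lo - hi) // (n - 1))          # ceil((hi - lo) / (n - 1)), >= 1
--     buckets = {}
--     for x in cuts:
--         b = (x - lo) // width
--         if b in buckets:
--             mn, mx = buckets[b]
--             buckets[b] = (min(mn, x), max(mx, x))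
--         else:
--             buckets[b] = (x, x)
--     best, prev = 0, lo
--     for b in range((hi - lo) // width + 1):
--         if b in buckets:
--             mn, mx = buckets[b]
--             best = max(best, mn - prev)
--             prev = mx
--     return best
--
-- def _axis_max(limit, cuts):
--     lo, hi = min(cuts), max(cuts)
--     best = max(lo, limit - hi)
--     if len(cuts) > 1:
--         best = max(best, _max_adjacent_gap(cuts, lo, hi))
--     return best
--
-- def solution_985_1(h, w, hc, vc):
--     return _axis_max(h, hc) * _axis_max(w, vc) % (10**9 + 7)
-- ===== Notes on version B (the rewrite author's own statement) =====
-- stated objective: alternative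
-- what changed: A sorts each cut list in place and scans consecutive elements for the largest gap; B never sorts: per axis it computes min/max, distributes the cuts into pigeonhole buckets of width ceil((hi-lo)/(n-1)) recording each bucket's min and max in one pass, and scans the buckets in index order taking the max of (bucket min - previous nonempty bucket max), combining that with the lowest cut and the distance from the highest cut to the axis limit; B also leaves the input lists unmutated.
import Mathlib
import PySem

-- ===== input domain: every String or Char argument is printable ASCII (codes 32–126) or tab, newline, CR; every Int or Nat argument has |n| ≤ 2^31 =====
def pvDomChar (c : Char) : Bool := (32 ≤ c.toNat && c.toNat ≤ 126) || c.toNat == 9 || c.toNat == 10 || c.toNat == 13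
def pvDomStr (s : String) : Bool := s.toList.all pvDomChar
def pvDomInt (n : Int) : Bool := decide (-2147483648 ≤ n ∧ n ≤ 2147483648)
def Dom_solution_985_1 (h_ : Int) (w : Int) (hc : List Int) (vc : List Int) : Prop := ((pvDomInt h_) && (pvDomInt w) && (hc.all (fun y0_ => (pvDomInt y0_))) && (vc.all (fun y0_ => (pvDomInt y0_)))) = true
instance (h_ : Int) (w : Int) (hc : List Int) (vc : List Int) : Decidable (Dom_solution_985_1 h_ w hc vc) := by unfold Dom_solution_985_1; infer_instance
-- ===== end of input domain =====

-- B replaces A's in-place sort + consecutive scan by a one-pass pigeonhole-bucket maximum-gap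
-- computation per axis (objective: alternative algorithm, same return value; A mutates hc/vc by
-- sorting them in place, B does not — the equivalence proved here is about the return value).


-- ===== PORT A =====
def solution_985_1 (h_ : Int) (w : Int) (hc : List Int) (vc : List Int) : Int :=
  let hcS := PySem.List.sorted hc (fun x => x) false
  let vcS := PySem.List.sorted vc (fun x => x) false
  match PySem.List.pyGet? hcS 0, PySem.List.pyGet? vcS 0 with
  | some mh0, some mv0 =>
      let maxh := (PySem.List.pyRange 1 (hcS.length : Int) 1).foldl
        (fun m i => max m (PySem.List.pyGetD hcS i 0 - PySem.List.pyGetD hcS (i - 1) 0)) mh0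
      let maxh2 := max maxh (h_ - PySem.List.pyGetD hcS (-1) 0)
      let maxv := (PySem.List.pyRange 1 (vcS.length : Int) 1).foldl
        (fun m i => max m (PySem.List.pyGetD vcS i 0 - PySem.List.pyGetD vcS (i - 1) 0)) mv0
      let maxv2 := max maxv (w - PySem.List.pyGetD vcS (-1) 0)
      PySem.Int.mod (maxh2 * maxv2) (10 ^ 9 + 7)
  | _, _ => 0

-- ===== PORT B =====
-- largest gap between consecutive values of cuts in sorted order, via pigeonhole buckets
def pvMaxAdjGap (cuts : List Int) (lo hi : Int) : Int :=
  if lo = hi then 0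
  else
    let n : Int := (cuts.length : Int)
    let width := -(PySem.Int.floordiv (lo - hi) (n - 1))
    let buckets := cuts.foldl
      (fun (d : PySem.Dict Int (Int × Int)) x =>
        let b := PySem.Int.floordiv (x - lo) width
        match PySem.Dict.get? d b with
        | some (mn, mx) => PySem.Dict.insert d b (min mn x, max mx x)
        | none => PySem.Dict.insert d b (x, x)) PySem.Dict.empty
    let st := (PySem.List.pyRange 0 (PySem.Int.floordiv (hi - lo) width + 1) 1).foldl
      (fun (st : Int × Int) b =>
        match PySem.Dict.get? buckets b with
        | some (mn, mx) => (max st.1 (mn - st.2), mx)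
        | none => st) (0, lo)
    st.1

def pvAxisMax (limit : Int) (cuts : List Int) : Int :=
  match PySem.List.min? cuts (fun x => x) with
  | none => 0  -- unreachable under Pre_ (Python min raises on an empty list)
  | some lo =>
    match PySem.List.max? cuts (fun x => x) with
    | none => 0  -- unreachable under Pre_ (Python max raises on an empty list)
    | some hi =>
      let best := max lo (limit - hi)
      if 1 < (cuts.length : Int) then max best (pvMaxAdjGap cuts lo hi) else best

def solution_985_1_alt (h_ : Int) (w : Int) (hc : List Int) (vc : List Int) : Int :=
  PySem.Int.mod (pvAxisMax h_ hc * pvAxisMax w vc) (10 ^ 9 + 7)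

-- ===== PRECONDITION & SPEC =====
-- Pre_ excludes exactly the inputs on which the Python A raises: an empty hc or vc
-- (IndexError at hc[0] / vc[0]).  B raises there too (min of an empty list).
def Pre_solution_985_1 (h_ : Int) (w : Int) (hc : List Int) (vc : List Int) : Prop :=
  hc ≠ [] ∧ vc ≠ []
instance (h_ : Int) (w : Int) (hc : List Int) (vc : List Int) : Decidable (Pre_solution_985_1 h_ w hc vc) := by unfold Pre_solution_985_1; infer_instance

def pvWitness_solution_985_1 : Int × Int × List Int × List Int := (5, 4, [1, 3], [2])

def Spec_solution_985_1 (h_ : Int) (w : Int) (hc : List Int) (vc : List Int) (out : Int) : Prop := out = solution_985_1_alt h_ w hc vc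
instance (h_ : Int) (w : Int) (hc : List Int) (vc : List Int) (out : Int) : Decidable (Spec_solution_985_1 h_ w hc vc out) := by unfold Spec_solution_985_1; infer_instance

-- ===== CLAIM (what is proved, stated in full; the proofs are below) =====
def Claim_equal_solution_985_1 : Prop := ∀ (h_ : Int) (w : Int) (hc : List Int) (vc : List Int), Dom_solution_985_1 h_ w hc vc → Pre_solution_985_1 h_ w hc vc → Spec_solution_985_1 h_ w hc vc (solution_985_1 h_ w hc vc)

-- ===== LEMMAS AND PROOFS =====

-- ---- the adjacent-gap list of A's scan ----

def pvGaps : List Int → List Int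
  | a :: b :: t => (b - a) :: pvGaps (b :: t)
  | _ => []

theorem pvGaps_length : ∀ s : List Int, (pvGaps s).length = s.length - 1
  | [] => rfl
  | [_] => rfl
  | _ :: b :: t => by simp [pvGaps, pvGaps_length (b :: t)]

theorem pvGaps_getElem : ∀ (s : List Int) (k : Nat) (h : k + 1 < s.length)
    (h' : k < (pvGaps s).length), (pvGaps s)[k] = s[k + 1] - s[k]
  | a :: b :: t, 0, _, _ => rfl
  | a :: b :: t, k + 1, h, h' => by
    have := pvGaps_getElem (b :: t) k (by simpa using h) (by simpa [pvGaps] using h')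
    simpa [pvGaps] using this

theorem pvGaps_mem (s : List Int) (g : Int) :
    g ∈ pvGaps s ↔ ∃ k, ∃ h : k + 1 < s.length, g = s[k + 1] - s[k] := by
  rw [List.mem_iff_getElem]
  constructor
  · rintro ⟨k, hk, rfl⟩
    have hk' : k + 1 < s.length := by have := pvGaps_length s; omega
    exact ⟨k, hk', pvGaps_getElem s k hk' hk⟩
  · rintro ⟨k, hk, rfl⟩
    have hk' : k < (pvGaps s).length := by have := pvGaps_length s; omega
    exact ⟨k, hk', pvGaps_getElem s k hk hk'⟩

-- A's index loop is the running max of the adjacent-gap list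
theorem pvALoop_eq (s : List Int) (m0 : Int) :
    (PySem.List.pyRange 1 (s.length : Int) 1).foldl
      (fun m i => max m (PySem.List.pyGetD s i 0 - PySem.List.pyGetD s (i - 1) 0)) m0
    = (pvGaps s).foldl max m0 := by
  have h1 : (PySem.List.pyRange 1 (s.length : Int) 1).foldl
      (fun m i => max m (PySem.List.pyGetD s i 0 - PySem.List.pyGetD s (i - 1) 0)) m0
      = ((PySem.List.pyRange 1 (s.length : Int) 1).map
          (fun i => PySem.List.pyGetD s i 0 - PySem.List.pyGetD s (i - 1) 0)).foldl max m0 := by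
    rw [List.foldl_map]
  rw [h1]
  congr 1
  apply List.ext_getElem
  · simp [PySem.List.length_pyRange_one, pvGaps_length]
  · intro k hk1 hk2
    have hk : k + 1 < s.length := by
      simp [PySem.List.length_pyRange_one] at hk1
      omega
    rw [pvGaps_getElem s k hk hk2]
    rw [List.getElem_map, PySem.List.getElem_pyRange_one]
    have e1 : (1 : Int) + (k : Int) = ((k + 1 : Nat) : Int) := by omega
    rw [e1]
    have e2' : ((k + 1 : Nat) : Int) - 1 = ((k : Nat) : Int) := by omega
    rw [e2', PySem.List.pyGetD_natCast, PySem.List.pyGetD_natCast]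
    rw [List.getD_eq_getElem _ _ hk, List.getD_eq_getElem _ _ (by omega)]

-- ---- order facts about the sorted list ----

theorem pvMono (s : List Int) (hpw : s.Pairwise (· ≤ ·)) {p q : Nat} (hpq : p ≤ q)
    (hq : q < s.length) : s[p]'(by omega) ≤ s[q] := by
  rcases Nat.lt_or_ge p q with h | h
  · exact (List.pairwise_iff_getElem.mp hpw) p q (by omega) hq h
  · have : p = q := by omega
    subst this; exact le_refl _

theorem pvLe_getLast (s : List Int) (hpw : s.Pairwise (· ≤ ·)) (hne : s ≠ []) :
    ∀ y ∈ s, y ≤ s.getLast hne := by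
  intro y hy
  rw [List.mem_iff_getElem] at hy
  obtain ⟨k, hk, rfl⟩ := hy
  rw [List.getLast_eq_getElem]
  exact pvMono s hpw (by omega) (by omega)

theorem pvHead_le (s : List Int) (hpw : s.Pairwise (· ≤ ·)) (hne : s ≠ []) :
    ∀ y ∈ s, s.head hne ≤ y := by
  intro y hy
  rw [List.mem_iff_getElem] at hy
  obtain ⟨k, hk, rfl⟩ := hy
  rw [List.head_eq_getElem]
  exact pvMono s hpw (by omega) hk

-- no element of a sorted list lies strictly between two consecutive entries
theorem pvAdjNoBetween (s : List Int) (hpw : s.Pairwise (· ≤ ·)) (k : Nat)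
    (hk : k + 1 < s.length) : ∀ z ∈ s, ¬(s[k] < z ∧ z < s[k + 1]) := by
  intro z hz
  rw [List.mem_iff_getElem] at hz
  obtain ⟨i, hi, rfl⟩ := hz
  rcases Nat.lt_or_ge i (k + 1) with h | h
  · have := pvMono s hpw (p := i) (q := k) (by omega) (by omega)
    omega
  · have := pvMono s hpw (p := k + 1) (q := i) h hi
    omega

-- ---- foldl max facts ----

theorem pvFoldlMaxComm : ∀ (l : List Int) (a b : Int),
    l.foldl max (max a b) = max a (l.foldl max b) := by
  intro l
  induction l with
  | nil => intro a b; rfl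
  | cons c t ih =>
    intro a b
    simp only [List.foldl_cons, max_assoc]
    exact ih a (max b c)

theorem pvFoldlMaxShift (l : List Int) (hne : l ≠ []) (hnn : ∀ g ∈ l, 0 ≤ g) (a : Int) :
    l.foldl max a = max a (l.foldl max 0) := by
  cases l with
  | nil => exact absurd rfl hne
  | cons c t =>
    simp only [List.foldl_cons]
    have h0 : max 0 c = c := max_eq_right (hnn c List.mem_cons_self)
    rw [h0, ← pvFoldlMaxComm]

-- ---- floor-division bounds (divisor positive) ----

theorem pvFdBounds (a w : Int) (hw : 0 < w) :
    w * PySem.Int.floordiv a w ≤ a ∧ a < w * PySem.Int.floordiv a w + w := by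
  rw [PySem.Int.floordiv_eq_ediv_of_pos hw]
  have h1 := Int.ediv_add_emod a w
  have h2 := Int.emod_nonneg a (by omega : w ≠ 0)
  have h3 := Int.emod_lt_of_pos a hw
  constructor <;> linarith

-- ===== B's bucket dict: invariant of the building fold =====

def pvBInv (bk : Int → Int) (xs : List Int) (d : PySem.Dict Int (Int × Int)) : Prop :=
  ∀ b : Int, match PySem.Dict.get? d b with
  | none => ∀ x ∈ xs, bk x ≠ b
  | some (mn, mx) => (mn ∈ xs ∧ bk mn = b) ∧ (mx ∈ xs ∧ bk mx = b) ∧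
      ∀ x ∈ xs, bk x = b → mn ≤ x ∧ x ≤ mx

theorem pvBInv_step (bk : Int → Int) (xs : List Int) (d : PySem.Dict Int (Int × Int))
    (hinv : pvBInv bk xs d) (x : Int) :
    pvBInv bk (xs ++ [x])
      (match PySem.Dict.get? d (bk x) with
       | some (mn, mx) => PySem.Dict.insert d (bk x) (min mn x, max mx x)
       | none => PySem.Dict.insert d (bk x) (x, x)) := by
  intro b
  have hb := hinv b
  by_cases hbx : b = bk x
  · cases hdx : PySem.Dict.get? d (bk x) with
    | none =>
      rw [hbx] at hb ⊢
      rw [hdx] at hb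
      simp only [hdx, PySem.Dict.get?_insert_self]
      refine ⟨⟨List.mem_append_right _ List.mem_cons_self, by trivial⟩,
              ⟨List.mem_append_right _ List.mem_cons_self, by trivial⟩, ?_⟩
      intro y hy hby
      rcases List.mem_append.mp hy with h | h
      · exact absurd hby (hb y h)
      · simp only [List.mem_singleton] at h; subst h; omega
    | some p =>
      obtain ⟨mn, mx⟩ := p
      rw [hbx] at hb ⊢
      rw [hdx] at hb
      obtain ⟨⟨hmn, hbmn⟩, ⟨hmx, hbmx⟩, hbound⟩ := hb
      simp only [hdx, PySem.Dict.get?_insert_self]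
      refine ⟨?_, ?_, ?_⟩
      · rcases min_choice mn x with h | h <;> rw [h]
        · exact ⟨List.mem_append_left _ hmn, hbmn⟩
        · exact ⟨List.mem_append_right _ List.mem_cons_self, by trivial⟩
      · rcases max_choice mx x with h | h <;> rw [h]
        · exact ⟨List.mem_append_left _ hmx, hbmx⟩
        · exact ⟨List.mem_append_right _ List.mem_cons_self, by trivial⟩
      · intro y hy hby
        rcases List.mem_append.mp hy with h | h
        · have := hbound y h hby
          constructor
          · exact le_trans (min_le_left _ _) this.1
          · exact le_trans this.2 (le_max_left _ _)
        · simp only [List.mem_singleton] at h; subst h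
          exact ⟨min_le_right _ _, le_max_right _ _⟩
  · have hne : (PySem.Dict.get? (match PySem.Dict.get? d (bk x) with
       | some (mn, mx) => PySem.Dict.insert d (bk x) (min mn x, max mx x)
       | none => PySem.Dict.insert d (bk x) (x, x)) b) = PySem.Dict.get? d b := by
      cases hdm : PySem.Dict.get? d (bk x) with
      | none => exact PySem.Dict.get?_insert_of_ne d _ hbx
      | some p => obtain ⟨mn, mx⟩ := p; exact PySem.Dict.get?_insert_of_ne d _ hbx
    rw [hne]
    cases hdb : PySem.Dict.get? d b with
    | none =>
      rw [hdb] at hb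
      intro y hy
      rcases List.mem_append.mp hy with h | h
      · exact hb y h
      · simp only [List.mem_singleton] at h; subst h; exact fun hc => hbx hc.symm
    | some q =>
      obtain ⟨mn, mx⟩ := q
      rw [hdb] at hb
      obtain ⟨⟨hmn, hbmn⟩, ⟨hmx, hbmx⟩, hbound⟩ := hb
      refine ⟨⟨List.mem_append_left _ hmn, hbmn⟩, ⟨List.mem_append_left _ hmx, hbmx⟩, ?_⟩
      intro y hy hby
      rcases List.mem_append.mp hy with h | h
      · exact hbound y h hby
      · simp only [List.mem_singleton] at h; subst h; exact absurd hby.symm hbx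

theorem pvBInv_fold (bk : Int → Int) :
    ∀ (l seen : List Int) (d : PySem.Dict Int (Int × Int)), pvBInv bk seen d →
      pvBInv bk (seen ++ l)
        (l.foldl (fun d x =>
          match PySem.Dict.get? d (bk x) with
          | some (mn, mx) => PySem.Dict.insert d (bk x) (min mn x, max mx x)
          | none => PySem.Dict.insert d (bk x) (x, x)) d) := by
  intro l
  induction l with
  | nil => intro seen d h; simpa using h
  | cons x t ih =>
    intro seen d h
    have h1 := pvBInv_step bk seen d h x
    have h2 := ih (seen ++ [x]) _ h1
    simpa using h2

theorem pvBInv_empty (bk : Int → Int) : pvBInv bk [] (PySem.Dict.empty) := by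
  intro b
  simp [PySem.Dict.get?_empty]

-- ===== B's scan loop (proof-side names for the port's inline lambdas; definitionally equal) =====

def pvStep (d : PySem.Dict Int (Int × Int)) (st : Int × Int) (b : Int) : Int × Int :=
  match PySem.Dict.get? d b with
  | some (mn, mx) => (max st.1 (mn - st.2), mx)
  | none => st

def pvBuild (lo w : Int) (cuts : List Int) : PySem.Dict Int (Int × Int) :=
  cuts.foldl
    (fun (d : PySem.Dict Int (Int × Int)) x =>
      match PySem.Dict.get? d (PySem.Int.floordiv (x - lo) w) with
      | some (mn, mx) => PySem.Dict.insert d (PySem.Int.floordiv (x - lo) w) (min mn x, max mx x)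
      | none => PySem.Dict.insert d (PySem.Int.floordiv (x - lo) w) (x, x)) PySem.Dict.empty

-- best is nondecreasing along the scan
theorem pvScanMono (d : PySem.Dict Int (Int × Int)) :
    ∀ (l : List Int) (st : Int × Int), st.1 ≤ (l.foldl (pvStep d) st).1 := by
  intro l
  induction l with
  | nil => intro st; exact le_refl _
  | cons b t ih =>
    intro st
    simp only [List.foldl_cons]
    refine le_trans ?_ (ih (pvStep d st b))
    unfold pvStep
    cases PySem.Dict.get? d b with
    | none => exact le_refl _
    | some p => exact le_max_left _ _

-- ---- arithmetic: last - head vs the gaps ----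

theorem pvLastSubHead : ∀ (s : List Int) (h : s ≠ []),
    s.getLast h - s.head h ≤ (pvGaps s).sum := by
  intro s
  induction s with
  | nil => intro h; exact absurd rfl h
  | cons a t ih =>
    intro h
    cases t with
    | nil => simp [pvGaps]
    | cons b t' =>
      have hne : b :: t' ≠ [] := List.cons_ne_nil _ _
      have := ih hne
      simp only [pvGaps, List.sum_cons, List.getLast_cons hne, List.head_cons] at *
      omega

theorem pvSumLeLen (M : Int) : ∀ (l : List Int), (∀ g ∈ l, g ≤ M) →
    l.sum ≤ (l.length : Int) * M := by
  intro l
  induction l with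
  | nil => intro _; simp
  | cons g t ih =>
    intro h
    have h1 : g ≤ M := h g List.mem_cons_self
    have h2 := ih (fun y hy => h y (List.mem_cons_of_mem _ hy))
    simp only [List.sum_cons, List.length_cons]
    push_cast
    linarith

-- discrete intermediate value: a crossing index exists
theorem pvCross (s : List Int) (a : Int) :
    ∀ (d ia ib : Nat) (hib : ib < s.length) (he : ib = ia + d + 1),
      s[ia]'(by omega) ≤ a → a < s[ib] →
      ∃ k, ∃ hk : k + 1 < s.length, s[k]'(by omega) ≤ a ∧ a < s[k + 1] := by
  intro d
  induction d with
  | zero =>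
    intro ia ib hib he h1 h2
    subst he
    exact ⟨ia, by omega, h1, h2⟩
  | succ d ih =>
    intro ia ib hib he h1 h2
    by_cases h : s[ia + 1]'(by omega) ≤ a
    · exact ih (ia + 1) ib hib (by omega) h h2
    · exact ⟨ia, by omega, h1, by omega⟩

-- two members of a sorted list with nothing strictly between are at most one max-gap apart
theorem pvGapLe (s : List Int) (hpw : s.Pairwise (· ≤ ·)) (a b : Int)
    (ha : a ∈ s) (hb : b ∈ s) (hab : a < b)
    (hnb : ∀ z ∈ s, ¬(a < z ∧ z < b)) :
    b - a ≤ (pvGaps s).foldl max 0 := by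
  rw [List.mem_iff_getElem] at ha hb
  obtain ⟨ia, hia, rfl⟩ := ha
  obtain ⟨ib, hib, rfl⟩ := hb
  have hord : ia < ib := by
    by_contra hcon
    have := pvMono s hpw (p := ib) (q := ia) (by omega) hia
    omega
  obtain ⟨k, hk, hk1, hk2⟩ := pvCross s (s[ia]) (ib - ia - 1) ia ib hib (by omega)
    (le_refl _) hab
  have hg : s[k + 1] - s[k] ∈ pvGaps s := (pvGaps_mem _ _).mpr ⟨k, hk, rfl⟩
  have hle := (PySem.List.le_foldl_max (pvGaps s) 0).2 _ hg
  have hk1' : ¬ (s[ia] < s[k + 1] ∧ s[k + 1] < s[ib]) := hnb _ (List.getElem_mem hk)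
  omega

-- ---- floor-division order facts ----

theorem pvBkMono (w : Int) (hw : 0 < w) (u v : Int) (huv : u ≤ v) :
    PySem.Int.floordiv u w ≤ PySem.Int.floordiv v w := by
  rw [PySem.Int.floordiv_eq_ediv_of_pos hw, PySem.Int.floordiv_eq_ediv_of_pos hw]
  exact Int.ediv_le_ediv hw huv

theorem pvBkJump (w : Int) (hw : 0 < w) (u v : Int) (h : u + w ≤ v) :
    PySem.Int.floordiv u w < PySem.Int.floordiv v w := by
  have h1 := pvFdBounds u w hw
  have h2 := pvFdBounds v w hw
  by_contra hc
  push_neg at hc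
  have := mul_le_mul_of_nonneg_left hc (le_of_lt hw)
  linarith

theorem pvBkNonneg (w : Int) (hw : 0 < w) (u : Int) (hu : 0 ≤ u) :
    0 ≤ PySem.Int.floordiv u w := by
  rw [PySem.Int.floordiv_eq_ediv_of_pos hw]
  exact Int.ediv_nonneg hu (le_of_lt hw)

-- ===== the main bucket lemma =====

theorem pvScanMain (cuts s : List Int) (hperm : s.Perm cuts)
    (hpw : s.Pairwise (· ≤ ·)) (hlen : 2 ≤ s.length) (hne : s ≠ [])
    (lo hi w : Int) (hw : 0 < w)
    (hlo : lo = s.head hne) (hhi : hi = s.getLast hne) (hlolt : lo < hi)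
    (hwlow : ((cuts.length : Int) - 1) * (w - 1) < hi - lo) :
    ((PySem.List.pyRange 0 (PySem.Int.floordiv (hi - lo) w + 1) 1).foldl
      (pvStep (pvBuild lo w cuts)) (0, lo)).1 = (pvGaps s).foldl max 0 := by
  have hG0 : (0 : Int) ≤ (pvGaps s).foldl max 0 := (PySem.List.le_foldl_max _ _).1
  have hloS : ∀ y ∈ s, lo ≤ y := by rw [hlo]; exact pvHead_le s hpw hne
  have hhiS : ∀ y ∈ s, y ≤ hi := by rw [hhi]; exact pvLe_getLast s hpw hne
  have hloC : ∀ y ∈ cuts, lo ≤ y := fun y hy => hloS y (hperm.mem_iff.mpr hy)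
  have hhiC : ∀ y ∈ cuts, y ≤ hi := fun y hy => hhiS y (hperm.mem_iff.mpr hy)
  have hloMem : lo ∈ cuts := hperm.mem_iff.mp (hlo ▸ List.head_mem hne)
  have hhiMem : hi ∈ cuts := hperm.mem_iff.mp (hhi ▸ List.getLast_mem hne)
  have hbklo : PySem.Int.floordiv (lo - lo) w = 0 := by
    rw [sub_self, PySem.Int.floordiv_eq_ediv_of_pos hw]
    exact Int.zero_ediv w
  have hmono : ∀ u v : Int, u ≤ v →
      PySem.Int.floordiv (u - lo) w ≤ PySem.Int.floordiv (v - lo) w :=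
    fun u v h => pvBkMono w hw (u - lo) (v - lo) (by omega)
  have hnn : ∀ x ∈ cuts, 0 ≤ PySem.Int.floordiv (x - lo) w :=
    fun x hx => pvBkNonneg w hw (x - lo) (by have := hloC x hx; omega)
  set G := (pvGaps s).foldl max 0 with hGdef
  set bks := pvBuild lo w cuts with hbksdef
  have hBInv : pvBInv (fun x => PySem.Int.floordiv (x - lo) w) cuts bks := by
    have h := pvBInv_fold (fun x => PySem.Int.floordiv (x - lo) w) cuts [] PySem.Dict.empty
      (pvBInv_empty _)
    simpa [hbksdef, pvBuild] using h
  -- the scan invariant over a prefix of the buckets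
  have hscan : ∀ jn : Nat,
      ((PySem.List.pyRange 0 (jn : Int) 1).foldl (pvStep bks) (0, lo)).1 ≤ G ∧
      ((((PySem.List.pyRange 0 (jn : Int) 1).foldl (pvStep bks) (0, lo)).2 ∈ cuts ∧
        PySem.Int.floordiv ((((PySem.List.pyRange 0 (jn : Int) 1).foldl (pvStep bks)
          (0, lo)).2) - lo) w < (jn : Int) ∧
        (∀ x ∈ cuts, PySem.Int.floordiv (x - lo) w < (jn : Int) →
          x ≤ ((PySem.List.pyRange 0 (jn : Int) 1).foldl (pvStep bks) (0, lo)).2)) ∨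
       ((((PySem.List.pyRange 0 (jn : Int) 1).foldl (pvStep bks) (0, lo)).2 = lo) ∧
        ∀ x ∈ cuts, ¬ PySem.Int.floordiv (x - lo) w < (jn : Int))) := by
    intro jn
    induction jn with
    | zero =>
      rw [show ((0 : Nat) : Int) = 0 by rfl, PySem.List.pyRange_one_eq_nil (le_refl 0)]
      simp only [List.foldl_nil]
      refine ⟨hG0, Or.inr ⟨by trivial, ?_⟩⟩
      intro x hx
      have := hnn x hx
      omega
    | succ j ih =>
      have hsplit : PySem.List.pyRange 0 ((j + 1 : Nat) : Int) 1
          = PySem.List.pyRange 0 (j : Int) 1 ++ [(j : Int)] := by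
        push_cast
        exact PySem.List.pyRange_one_succ_right (by positivity)
      rw [hsplit, List.foldl_append, List.foldl_cons, List.foldl_nil]
      obtain ⟨ihb, ihp⟩ := ih
      set st := (PySem.List.pyRange 0 (j : Int) 1).foldl (pvStep bks) (0, lo) with hstdef
      cases hg : PySem.Dict.get? bks (j : Int) with
      | none =>
        have hstep : pvStep bks st (j : Int) = st := by
          unfold pvStep
          rw [hg]
        rw [hstep]
        have hnone := hBInv (j : Int)
        rw [hg] at hnone
        simp only [] at hnone
        refine ⟨ihb, ?_⟩
        have hlt : ∀ x ∈ cuts, PySem.Int.floordiv (x - lo) w < ((j + 1 : Nat) : Int) →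
            PySem.Int.floordiv (x - lo) w < (j : Int) := by
          intro x hx h
          have := hnone x hx
          push_cast at h
          omega
        rcases ihp with ⟨hC, hB, hMax⟩ | ⟨heq, hnonex⟩
        · exact Or.inl ⟨hC, by push_cast; omega, fun x hx h => hMax x hx (hlt x hx h)⟩
        · exact Or.inr ⟨heq, fun x hx h => hnonex x hx (hlt x hx h)⟩
      | some p =>
        obtain ⟨mn, mx⟩ := p
        have hstep : pvStep bks st (j : Int) = (max st.1 (mn - st.2), mx) := by
          unfold pvStep
          rw [hg]
        rw [hstep]
        have hsome := hBInv (j : Int)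
        rw [hg] at hsome
        simp only [] at hsome
        obtain ⟨⟨hmnC, hmnB⟩, ⟨hmxC, hmxB⟩, hbound⟩ := hsome
        constructor
        · -- best stays ≤ G
          apply max_le ihb
          rcases ihp with ⟨hC, hB, hMax⟩ | ⟨heq, hnonex⟩
          · -- prev is the max of the lower buckets
            have hprevlt : st.2 < mn := by
              by_contra hc
              push_neg at hc
              have := hmono mn st.2 hc
              omega
            have hnb : ∀ z ∈ s, ¬ (st.2 < z ∧ z < mn) := by
              intro z hz hzb
              have hzC : z ∈ cuts := hperm.mem_iff.mp hz
              rcases lt_trichotomy (PySem.Int.floordiv (z - lo) w) (j : Int) with hb | hb | hb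
              · exact absurd (hMax z hzC hb) (not_le.mpr hzb.1)
              · have := (hbound z hzC hb).1
                omega
              · have := hmono z mn (le_of_lt hzb.2)
                omega
            exact pvGapLe s hpw st.2 mn (hperm.mem_iff.mpr hC) (hperm.mem_iff.mpr hmnC)
              hprevlt hnb
          · -- no lower bucket yet: j = 0 and mn = lo
            have hj0 : (j : Int) = 0 := by
              have := hnonex lo hloMem
              rw [hbklo] at this
              omega
            have hmnlo : mn = lo := by
              have h1 := (hbound lo hloMem (by rw [hbklo, hj0])).1
              have h2 := hloC mn hmnC
              omega
            rw [heq, hmnlo]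
            omega
        · -- the new prev mx is the max of the buckets < j+1
          refine Or.inl ⟨hmxC, by push_cast; omega, ?_⟩
          intro x hx hxlt
          push_cast at hxlt
          rcases lt_trichotomy (PySem.Int.floordiv (x - lo) w) (j : Int) with hb | hb | hb
          · rcases ihp with ⟨hC, hB, hMax⟩ | ⟨heq, hnonex⟩
            · have h1 := hMax x hx hb
              have h2 : st.2 ≤ mx := by
                by_contra hc
                push_neg at hc
                have := hmono mx st.2 (le_of_lt hc)
                omega
              omega
            · exact absurd hb (hnonex x hx)
          · exact (hbound x hx hb).2
          · omega
  -- upper bound at the full range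
  have hfdnn : 0 ≤ PySem.Int.floordiv (hi - lo) w := pvBkNonneg w hw (hi - lo) (by omega)
  have hub := (hscan (PySem.Int.floordiv (hi - lo) w + 1).toNat).1
  rw [Int.toNat_of_nonneg (by omega)] at hub
  -- lower bound
  rcases PySem.List.foldl_max_mem (pvGaps s) 0 with hGz | hGmem
  · -- G = 0: best starts at 0 and never decreases
    have hmono0 := pvScanMono bks (PySem.List.pyRange 0 (PySem.Int.floordiv (hi - lo) w + 1) 1)
      (0, lo)
    rw [hGdef] at *
    omega
  · obtain ⟨k, hk, hGe⟩ := (pvGaps_mem s _).mp hGmem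
    -- G is at least the bucket width (pigeonhole)
    have hsum1 := pvLastSubHead s hne
    have hsum2 := pvSumLeLen G (pvGaps s) (PySem.List.le_foldl_max (pvGaps s) 0).2
    have hGlen : ((pvGaps s).length : Int) = (cuts.length : Int) - 1 := by
      rw [pvGaps_length, ← hperm.length_eq]
      omega
    have hwG : w ≤ G := by
      by_contra hc
      push_neg at hc
      have h1 : ((cuts.length : Int) - 1) * G ≤ ((cuts.length : Int) - 1) * (w - 1) := by
        apply mul_le_mul_of_nonneg_left (by omega)
        have := hperm.length_eq
        omega
      rw [hGlen] at hsum2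
      rw [← hlo, ← hhi] at hsum1
      linarith
    have haS : s[k] ∈ s := List.getElem_mem (by omega)
    have hbS : s[k + 1] ∈ s := List.getElem_mem hk
    have haC : s[k] ∈ cuts := hperm.mem_iff.mp haS
    have hbC : s[k + 1] ∈ cuts := hperm.mem_iff.mp hbS
    have hjump : PySem.Int.floordiv (s[k] - lo) w < PySem.Int.floordiv (s[k + 1] - lo) w :=
      pvBkJump w hw (s[k] - lo) (s[k + 1] - lo) (by omega)
    cases hg : PySem.Dict.get? bks (PySem.Int.floordiv (s[k + 1] - lo) w) with
    | none =>
      have hnone := hBInv (PySem.Int.floordiv (s[k + 1] - lo) w)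
      rw [hg] at hnone
      simp only [] at hnone
      exact absurd rfl (hnone _ hbC)
    | some p =>
      obtain ⟨mn, mx⟩ := p
      have hsome := hBInv (PySem.Int.floordiv (s[k + 1] - lo) w)
      rw [hg] at hsome
      simp only [] at hsome
      obtain ⟨⟨hmnC, hmnB⟩, ⟨hmxC, hmxB⟩, hbound⟩ := hsome
      have hmnb : mn = s[k + 1] := by
        have h1 := (hbound _ hbC rfl).1
        have h2 : s[k] < mn := by
          by_contra hcon
          push_neg at hcon
          have := hmono mn s[k] hcon
          omega
        have h3 := pvAdjNoBetween s hpw k hk mn (hperm.mem_iff.mpr hmnC)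
        omega
      have hjnn : 0 ≤ PySem.Int.floordiv (s[k + 1] - lo) w := hnn _ hbC
      have hjlt : PySem.Int.floordiv (s[k + 1] - lo) w < PySem.Int.floordiv (hi - lo) w + 1 := by
        have := hmono s[k + 1] hi (hhiC _ hbC)
        omega
      have hsplitEq : PySem.List.pyRange 0 (PySem.Int.floordiv (hi - lo) w + 1) 1
          = PySem.List.pyRange 0 (PySem.Int.floordiv (s[k + 1] - lo) w) 1
            ++ (PySem.Int.floordiv (s[k + 1] - lo) w)
              :: PySem.List.pyRange (PySem.Int.floordiv (s[k + 1] - lo) w + 1)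
                  (PySem.Int.floordiv (hi - lo) w + 1) 1 := by
        rw [PySem.List.pyRange_one_append 0 (PySem.Int.floordiv (s[k + 1] - lo) w)
          (PySem.Int.floordiv (hi - lo) w + 1) hjnn (by omega)]
        rw [PySem.List.pyRange_one_cons hjlt]
      have hpre := hscan (PySem.Int.floordiv (s[k + 1] - lo) w).toNat
      rw [Int.toNat_of_nonneg hjnn] at hpre
      obtain ⟨hpb, hpp⟩ := hpre
      set st1 := (PySem.List.pyRange 0 (PySem.Int.floordiv (s[k + 1] - lo) w) 1).foldl
        (pvStep bks) (0, lo) with hst1def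
      have hprev : st1.2 = s[k] := by
        rcases hpp with ⟨hC, hB, hMax⟩ | ⟨heq, hnonex⟩
        · have h1 : s[k] ≤ st1.2 := hMax _ haC hjump
          have h2 : st1.2 < s[k + 1] := by
            by_contra hcon
            push_neg at hcon
            have := hmono s[k + 1] st1.2 hcon
            omega
          have h3 := pvAdjNoBetween s hpw k hk st1.2 (hperm.mem_iff.mpr hC)
          omega
        · exact absurd hjump (by have := hnonex _ haC; omega)
      have hsteq : pvStep bks st1 (PySem.Int.floordiv (s[k + 1] - lo) w)
          = (max st1.1 (mn - st1.2), mx) := by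
        unfold pvStep
        rw [hg]
      have hlow : G ≤ ((PySem.List.pyRange 0 (PySem.Int.floordiv (hi - lo) w + 1) 1).foldl
          (pvStep bks) (0, lo)).1 := by
        rw [hsplitEq, List.foldl_append, List.foldl_cons, ← hst1def, hsteq]
        refine le_trans ?_ (pvScanMono bks _ _)
        rw [hmnb, hprev]
        simp only []
        omega
      exact le_antisymm hub hlow

theorem pvGapBucket (cuts s : List Int) (hperm : s.Perm cuts)
    (hpw : s.Pairwise (· ≤ ·)) (hlen : 2 ≤ s.length) (hne : s ≠ [])
    (lo hi : Int) (hlo : lo = s.head hne) (hhi : hi = s.getLast hne) :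
    pvMaxAdjGap cuts lo hi = (pvGaps s).foldl max 0 := by
  have hloS : ∀ y ∈ s, lo ≤ y := by rw [hlo]; exact pvHead_le s hpw hne
  have hhiS : ∀ y ∈ s, y ≤ hi := by rw [hhi]; exact pvLe_getLast s hpw hne
  by_cases hlh : lo = hi
  · unfold pvMaxAdjGap
    rw [if_pos hlh]
    rcases PySem.List.foldl_max_mem (pvGaps s) 0 with h | h
    · exact h.symm
    · rw [pvGaps_mem] at h
      obtain ⟨k, hk, he⟩ := h
      have h1 := hloS _ (List.getElem_mem hk)
      have h2 := hhiS _ (List.getElem_mem hk)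
      have h3 := hloS (s[k]'(by omega)) (List.getElem_mem (by omega))
      have h4 := hhiS (s[k]'(by omega)) (List.getElem_mem (by omega))
      omega
  · have hlolt : lo < hi := by
      have := hhiS _ (hlo ▸ List.head_mem hne)
      omega
    have hn2 : 2 ≤ (cuts.length : Int) := by
      have := hperm.length_eq
      omega
    unfold pvMaxAdjGap
    rw [if_neg hlh]
    have hfd := pvFdBounds (lo - hi) ((cuts.length : Int) - 1) (by omega)
    have hwlow : ((cuts.length : Int) - 1) *
        (-(PySem.Int.floordiv (lo - hi) ((cuts.length : Int) - 1)) - 1) < hi - lo := by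
      rw [mul_sub, mul_neg, mul_one]
      linarith [hfd.2]
    have hw : 0 < -(PySem.Int.floordiv (lo - hi) ((cuts.length : Int) - 1)) := by
      rcases le_or_gt (-(PySem.Int.floordiv (lo - hi) ((cuts.length : Int) - 1))) 0 with hc | hc
      · exfalso
        nlinarith [hwlow, hn2]
      · exact hc
    exact pvScanMain cuts s hperm hpw hlen hne lo hi _ hw hlo hhi hlolt hwlow

-- ===== the per-axis equivalence =====

theorem pvAxis_main (limit : Int) (cuts : List Int) (hne : cuts ≠ []) (mh0 : Int) (t : List Int)
    (hs : PySem.List.sorted cuts (fun x => x) false = mh0 :: t) :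
    (let s := mh0 :: t
     max ((PySem.List.pyRange 1 (s.length : Int) 1).foldl
        (fun m i => max m (PySem.List.pyGetD s i 0 - PySem.List.pyGetD s (i - 1) 0)) mh0)
      (limit - PySem.List.pyGetD s (-1) 0)) = pvAxisMax limit cuts := by
  simp only []
  have hsne : mh0 :: t ≠ [] := List.cons_ne_nil _ _
  have hperm : (mh0 :: t).Perm cuts := hs ▸ PySem.List.sorted_perm cuts (fun x => x) false
  have hpw : (mh0 :: t).Pairwise (· ≤ ·) := by
    have h := PySem.List.sorted_pairwise cuts (fun x => x)
    rw [hs] at h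
    exact h
  have hmemiff : ∀ y : Int, y ∈ cuts ↔ y ∈ mh0 :: t := fun y => hperm.mem_iff.symm
  have hlen : (mh0 :: t).length = cuts.length := hperm.length_eq
  unfold pvAxisMax
  rcases hmin : PySem.List.min? cuts (fun x => x) with _ | mn
  · exact absurd ((PySem.List.min?_eq_none_iff _ _).1 hmin) hne
  rcases hmax : PySem.List.max? cuts (fun x => x) with _ | mx
  · exact absurd ((PySem.List.max?_eq_none_iff _ _).1 hmax) hne
  simp only []
  have hmn : mn = mh0 := by
    have h1 : mn ∈ cuts := PySem.List.min?_mem hmin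
    have h2 : ∀ y ∈ cuts, mn ≤ y := PySem.List.min?_isMin hmin
    have h3 : ∀ y ∈ cuts, mh0 ≤ y := PySem.List.key_head_sorted_le _ _ hs
    exact le_antisymm (h2 mh0 ((hmemiff mh0).2 List.mem_cons_self)) (h3 mn h1)
  have hmx : mx = (mh0 :: t).getLast hsne := by
    have h1 : mx ∈ cuts := PySem.List.max?_mem hmax
    have h2 : ∀ y ∈ cuts, y ≤ mx := PySem.List.max?_isMax hmax
    exact le_antisymm
      (pvLe_getLast _ hpw hsne mx ((hmemiff mx).1 h1))
      (h2 _ ((hmemiff _).2 (List.getLast_mem hsne)))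
  simp only [PySem.List.pyGetD_neg_one _ _ hsne]
  rw [pvALoop_eq]
  cases t with
  | nil =>
    have hlen1 : ¬ (1 : Int) < (cuts.length : Int) := by
      simp only [List.length_cons, List.length_nil] at hlen
      omega
    rw [if_neg hlen1]
    simp only [pvGaps, List.foldl_nil, List.getLast_singleton] at *
    rw [hmn, hmx]
  | cons b t' =>
    have hlen2 : (1 : Int) < (cuts.length : Int) := by
      simp only [List.length_cons] at hlen
      omega
    rw [if_pos hlen2]
    have hgne : pvGaps (mh0 :: b :: t') ≠ [] := by
      have := pvGaps_length (mh0 :: b :: t')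
      intro hcon
      rw [hcon] at this
      simp at this
    have hgnn : ∀ g ∈ pvGaps (mh0 :: b :: t'), 0 ≤ g := by
      intro g hg
      rw [pvGaps_mem] at hg
      obtain ⟨k, hk, rfl⟩ := hg
      have := pvMono (mh0 :: b :: t') hpw (p := k) (q := k + 1) (by omega) hk
      omega
    rw [pvFoldlMaxShift _ hgne hgnn]
    rw [pvGapBucket cuts (mh0 :: b :: t') hperm hpw (by simp) (List.cons_ne_nil _ _)
      mn mx (by rw [hmn]; rfl) (by rw [hmx])]
    rw [hmn, hmx]
    exact max_right_comm _ _ _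

-- ===== VERDICT (by name: the statement is the Claim_ definition above) =====
theorem solution_985_1_spec : Claim_equal_solution_985_1 := by
  intro h_ w hc vc _hdom hpre
  obtain ⟨hhc, hvc⟩ := hpre
  unfold Spec_solution_985_1 solution_985_1 solution_985_1_alt
  obtain ⟨mh0, th, hsh⟩ : ∃ a l, PySem.List.sorted hc (fun x => x) false = a :: l := by
    rcases hson : PySem.List.sorted hc (fun x => x) false with _ | ⟨a, l⟩
    · exact absurd ((PySem.List.sorted_eq_nil_iff _ _ _).1 hson) hhc
    · exact ⟨a, l, rfl⟩
  obtain ⟨mv0, tv, hsv⟩ : ∃ a l, PySem.List.sorted vc (fun x => x) false = a :: l := by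
    rcases hson : PySem.List.sorted vc (fun x => x) false with _ | ⟨a, l⟩
    · exact absurd ((PySem.List.sorted_eq_nil_iff _ _ _).1 hson) hvc
    · exact ⟨a, l, rfl⟩
  have h1 := pvAxis_main h_ hc hhc mh0 th hsh
  have h2 := pvAxis_main w vc hvc mv0 tv hsv
  simp only at h1 h2
  simp only [hsh, hsv, PySem.List.pyGet?_zero_cons]
  rw [← h1, ← h2]
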